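-- pv_equiv track=rewrite | github.com/santhoshtk01/Advanced-Password-Manager-CLI | StrengthAnalyzer/training.py | convert_password_to_vector
-- ===== SOURCE A (Python) =====
-- import string
--
-- def convert_password_to_vector(password: str):
--     output_vector = [0, 0, 0, 0, 0]
--
--     # Check if the password length exceeds 8
--     if len(password) >= 8:
--         output_vector[4] = 1
--
--     for char in password:
--         if char in string.ascii_lowercase:
--             output_vector[0] = 1
--         elif char in string.ascii_uppercase:
--             output_vector[1] = 1
--         elif char in string.digits:
--             output_vector[2] = 1
--         elif char in string.punctuation:
--             output_vector[3] = 1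
--
--     return output_vector
-- ===== SOURCE B (Python) =====
-- def convert_password_to_vector(password: str):
--     codes = [ord(c) for c in password]
--     return [
--         int(any(97 <= x <= 122 for x in codes)),
--         int(any(65 <= x <= 90 for x in codes)),
--         int(any(48 <= x <= 57 for x in codes)),
--         int(any(33 <= x <= 126
--                 and not (48 <= x <= 57 or 65 <= x <= 90 or 97 <= x <= 122)
--                 for x in codes)),
--         int(len(codes) >= 8),
--     ]
-- ===== Notes on version B (the rewrite author's own statement) =====
-- stated objective: alternative
-- what changed: Replaces the per-character loop with its elif cascade over class strings by mapping to ASCII codes once and testing four arithmetic code-range predicates with any(), with punctuation derived as printable-and-not-alphanumeric.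
import Mathlib
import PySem

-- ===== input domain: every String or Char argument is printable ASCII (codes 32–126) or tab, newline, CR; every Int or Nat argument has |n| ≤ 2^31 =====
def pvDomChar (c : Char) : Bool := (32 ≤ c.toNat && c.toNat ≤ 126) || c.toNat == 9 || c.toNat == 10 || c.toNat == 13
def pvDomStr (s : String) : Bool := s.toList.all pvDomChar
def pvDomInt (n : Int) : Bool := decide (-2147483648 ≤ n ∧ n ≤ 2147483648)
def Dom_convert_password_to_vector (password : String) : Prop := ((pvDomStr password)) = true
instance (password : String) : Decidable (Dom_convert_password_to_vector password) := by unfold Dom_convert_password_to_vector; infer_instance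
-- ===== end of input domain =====

-- B maps the password to ASCII codes once and builds the vector from four arithmetic
-- code-range tests (punctuation = printable and not alphanumeric), replacing A's
-- per-character loop with its elif cascade over class strings; objective: alternative.


-- ===== PORT A =====
-- string.ascii_lowercase / ascii_uppercase / digits / punctuation as character lists
def pvLower : List Char := ['a', 'b', 'c', 'd', 'e', 'f', 'g', 'h', 'i', 'j', 'k', 'l', 'm', 'n', 'o', 'p', 'q', 'r', 's', 't', 'u', 'v', 'w', 'x', 'y', 'z']
def pvUpper : List Char := ['A', 'B', 'C', 'D', 'E', 'F', 'G', 'H', 'I', 'J', 'K', 'L', 'M', 'N', 'O', 'P', 'Q', 'R', 'S', 'T', 'U', 'V', 'W', 'X', 'Y', 'Z']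
def pvDigits : List Char := ['0', '1', '2', '3', '4', '5', '6', '7', '8', '9']
def pvPunct : List Char := ['!', '"', '#', '$', '%', '&', '\'', '(', ')', '*', '+', ',', '-', '.', '/', ':', ';', '<', '=', '>', '?', '@', '[', '\\', ']', '^', '_', '`', '{', '|', '}', '~']

-- loop body: 'char in <class string>' for a single char is membership in its characters (exact)
def pvStepA (v : Int × Int × Int × Int × Int) (c : Char) : Int × Int × Int × Int × Int :=
  if pvLower.contains c then (1, v.2.1, v.2.2.1, v.2.2.2.1, v.2.2.2.2)
  else if pvUpper.contains c then (v.1, 1, v.2.2.1, v.2.2.2.1, v.2.2.2.2)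
  else if pvDigits.contains c then (v.1, v.2.1, 1, v.2.2.2.1, v.2.2.2.2)
  else if pvPunct.contains c then (v.1, v.2.1, v.2.2.1, 1, v.2.2.2.2)
  else v

def convert_password_to_vector (password : String) : List Int :=
  -- output_vector = [0,0,0,0,0]; if len >= 8 then output_vector[4] = 1 (slot 4 is never touched by the loop)
  let v0 : Int × Int × Int × Int × Int :=
    (0, 0, 0, 0, if PySem.Str.len password ≥ 8 then 1 else 0)
  let r := password.toList.foldl pvStepA v0
  [r.1, r.2.1, r.2.2.1, r.2.2.2.1, r.2.2.2.2]

-- ===== PORT B =====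
-- codes = [ord(c) for c in password]; each slot is int(any(<code-range test>)); ord is exact
def convert_password_to_vector_alt (password : String) : List Int :=
  let codes : List Int := password.toList.map (fun c => (c.toNat : Int))
  [if codes.any (fun x => decide (97 ≤ x ∧ x ≤ 122)) then 1 else 0,
   if codes.any (fun x => decide (65 ≤ x ∧ x ≤ 90)) then 1 else 0,
   if codes.any (fun x => decide (48 ≤ x ∧ x ≤ 57)) then 1 else 0,
   if codes.any (fun x => decide ((33 ≤ x ∧ x ≤ 126) ∧
       ¬((48 ≤ x ∧ x ≤ 57) ∨ (65 ≤ x ∧ x ≤ 90) ∨ (97 ≤ x ∧ x ≤ 122)))) then 1 else 0,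
   if PySem.Str.len password ≥ 8 then 1 else 0]

-- ===== PRECONDITION & SPEC =====
def Spec_convert_password_to_vector (password : String) (out : List Int) : Prop := out = convert_password_to_vector_alt password
instance (password : String) (out : List Int) : Decidable (Spec_convert_password_to_vector password out) := by unfold Spec_convert_password_to_vector; infer_instance

-- ===== CLAIM (what is proved, stated in full; the proofs are below) =====
def Claim_equal_convert_password_to_vector : Prop := ∀ (password : String), Dom_convert_password_to_vector password → Spec_convert_password_to_vector password (convert_password_to_vector password)

-- ===== LEMMAS AND PROOFS =====

-- characterization of A's fold: each slot becomes 1 iff some character passes its elif branch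
lemma foldA_char (l : List Char) (v : Int × Int × Int × Int × Int) :
    l.foldl pvStepA v =
      ((if l.any (fun c => pvLower.contains c) then 1 else v.1),
       (if l.any (fun c => !pvLower.contains c && pvUpper.contains c) then 1 else v.2.1),
       (if l.any (fun c => !pvLower.contains c && !pvUpper.contains c && pvDigits.contains c) then 1 else v.2.2.1),
       (if l.any (fun c => !pvLower.contains c && !pvUpper.contains c && !pvDigits.contains c && pvPunct.contains c) then 1 else v.2.2.2.1),
       v.2.2.2.2) := by
  induction l generalizing v with
  | nil => simp
  | cons c t ih =>
    simp only [List.foldl_cons, ih, List.any_cons]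
    by_cases h1 : c ∈ pvLower <;>
      by_cases h2 : c ∈ pvUpper <;>
        by_cases h3 : c ∈ pvDigits <;>
          by_cases h4 : c ∈ pvPunct <;>
            simp [pvStepA, h1, h2, h3, h4]

-- characters are determined by their code, so list membership is a code-range test
lemma eq_iff_toNat (c d : Char) : c = d ↔ c.toNat = d.toNat :=
  ⟨fun h => h ▸ rfl, fun h => Char.ext (UInt32.toNat_inj.mp h)⟩

lemma mem_low (c : Char) : c ∈ pvLower ↔ 97 ≤ c.toNat ∧ c.toNat ≤ 122 := by
  simp only [pvLower, List.mem_cons, List.not_mem_nil, or_false, eq_iff_toNat, Char.reduceToNat]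
  omega

lemma mem_up (c : Char) : c ∈ pvUpper ↔ 65 ≤ c.toNat ∧ c.toNat ≤ 90 := by
  simp only [pvUpper, List.mem_cons, List.not_mem_nil, or_false, eq_iff_toNat, Char.reduceToNat]
  omega

lemma mem_dig (c : Char) : c ∈ pvDigits ↔ 48 ≤ c.toNat ∧ c.toNat ≤ 57 := by
  simp only [pvDigits, List.mem_cons, List.not_mem_nil, or_false, eq_iff_toNat, Char.reduceToNat]
  omega

lemma mem_punct (c : Char) :
    c ∈ pvPunct ↔ (33 ≤ c.toNat ∧ c.toNat ≤ 126) ∧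
      ¬((48 ≤ c.toNat ∧ c.toNat ≤ 57) ∨ (65 ≤ c.toNat ∧ c.toNat ≤ 90) ∨
        (97 ≤ c.toNat ∧ c.toNat ≤ 122)) := by
  simp only [pvPunct, List.mem_cons, List.not_mem_nil, or_false, eq_iff_toNat, Char.reduceToNat]
  omega

-- ===== VERDICT (by name: the statement is the Claim_ definition above) =====
theorem convert_password_to_vector_spec : Claim_equal_convert_password_to_vector := by
  intro password _
  unfold Spec_convert_password_to_vector
  simp only [convert_password_to_vector, convert_password_to_vector_alt, foldA_char, List.any_map]
  simp only [List.any_eq_true, List.cons.injEq, and_true, Bool.and_eq_true,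
    Bool.not_eq_eq_eq_not, Bool.not_true, List.contains_eq_mem, decide_eq_true_eq,
    decide_eq_false_iff_not, mem_low, mem_up, mem_dig, mem_punct]
  refine ⟨if_congr ?_ rfl rfl, if_congr ?_ rfl rfl, if_congr ?_ rfl rfl, if_congr ?_ rfl rfl⟩ <;>
    exact exists_congr fun c => and_congr_right fun _ => by
      simp only [Function.comp_apply, decide_eq_true_eq]
      omega
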